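-- pv_equiv track=rewrite | github.com/mickeyshoes/algorithm_practice | 이코테/law_of_biggest.py | catch_big_number
-- ===== SOURCE A (Python) =====
-- def catch_big_number(num_list):
--     big = num_list[0]
--
--     for i in range(len(num_list)):
--         if i + 1 == len(num_list):
--             pass
--         else:
--             if big < num_list[i+1]:
--                 big = num_list[i+1]
--
--     num_list.remove(big)
--     return big
-- ===== SOURCE B (Python) =====
-- def catch_big_number(num_list):
--     big = sorted(num_list)[-1]
--     num_list.remove(big)
--     return big
-- ===== Notes on version B (the rewrite author's own statement) =====
-- stated objective: simpler
-- what changed: Replaces A's index-based linear max scan (with an off-the-end guard) by sorting the list and taking the last element of the sorted copy.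
import Mathlib
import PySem

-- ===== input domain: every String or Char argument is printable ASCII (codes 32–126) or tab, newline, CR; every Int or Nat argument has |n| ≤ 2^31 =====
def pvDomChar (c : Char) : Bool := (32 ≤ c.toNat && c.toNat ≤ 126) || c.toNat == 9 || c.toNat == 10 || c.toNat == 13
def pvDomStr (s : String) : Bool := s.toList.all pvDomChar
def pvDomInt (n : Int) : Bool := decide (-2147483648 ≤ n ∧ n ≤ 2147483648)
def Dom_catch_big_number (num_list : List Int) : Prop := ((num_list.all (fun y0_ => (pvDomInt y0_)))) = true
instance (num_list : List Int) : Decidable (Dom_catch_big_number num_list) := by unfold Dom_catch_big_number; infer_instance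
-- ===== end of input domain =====

-- B replaces A's index-based linear max scan by sort-then-take-last (simpler decomposition);
-- both mutate the argument identically (remove the max once); the equivalence proved is about the return value.


-- ===== PORT A =====
-- literal port: big = num_list[0]; for i in range(len): guard i+1==len else max-update with num_list[i+1];
-- the guard keeps i+1 in range, so pyGetD's default is never used; num_list.remove(big) only mutates.
def catch_big_number (num_list : List Int) : Int :=
  let big := (PySem.List.pyGet? num_list 0).getD 0
  let big := (PySem.List.pyRange 0 num_list.length 1).foldl
    (fun big i =>
      if i + 1 = (num_list.length : Int) then big
      else
        let v := PySem.List.pyGetD num_list (i + 1) 0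
        if big < v then v else big) big
  big

-- ===== PORT B =====
-- big = sorted(num_list)[-1]; num_list.remove(big) only mutates; return big
def catch_big_number_alt (num_list : List Int) : Int :=
  let s := PySem.List.sorted num_list (fun x => x) false
  (PySem.List.pyGet? s (-1)).getD 0

-- ===== PRECONDITION & SPEC =====
-- Both programs raise IndexError on the empty list (first-element access in A, last-of-sorted access in B); excluded here.
def Pre_catch_big_number (num_list : List Int) : Prop := num_list ≠ []
instance (num_list : List Int) : Decidable (Pre_catch_big_number num_list) := by unfold Pre_catch_big_number; infer_instance
def pvWitness_catch_big_number : List Int := ([3, 1, 4, 1, 5])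

def Spec_catch_big_number (num_list : List Int) (out : Int) : Prop := out = catch_big_number_alt num_list
instance (num_list : List Int) (out : Int) : Decidable (Spec_catch_big_number num_list out) := by unfold Spec_catch_big_number; infer_instance

-- ===== CLAIM (what is proved, stated in full; the proofs are below) =====
def Claim_equal_catch_big_number : Prop := ∀ (num_list : List Int), Dom_catch_big_number num_list → Pre_catch_big_number num_list → Spec_catch_big_number num_list (catch_big_number num_list)

-- ===== LEMMAS AND PROOFS =====

-- every member of a (≤)-sorted list is ≤ its last element
theorem pv_mem_le_getLast : ∀ (s : List Int) (hs : s ≠ []), s.Pairwise (· ≤ ·) →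
    ∀ y ∈ s, y ≤ s.getLast hs := by
  intro s
  induction s with
  | nil => intro hs; exact absurd rfl hs
  | cons a rest ih =>
    intro _ hp y hy
    rcases rest.eq_nil_or_concat with hrest | _
    · subst hrest; simp at hy; simp [hy]
    · have hrne : rest ≠ [] := by
        rcases ‹∃ _, _› with ⟨l', b, rfl⟩; simp
      rw [List.getLast_cons hrne]
      rcases List.mem_cons.mp hy with rfl | hyr
      · exact le_trans ((List.pairwise_cons.mp hp).1 _ (rest.getLast_mem hrne)) le_rfl
      · exact ih hrne (List.pairwise_cons.mp hp).2 y hyr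

-- A's fold on h :: t computes the running max of t starting from h
theorem pv_A_eq_foldl_max (h : Int) (t : List Int) :
    catch_big_number (h :: t) = t.foldl max h := by
  unfold catch_big_number
  simp only [PySem.List.pyGet?_zero_cons, Option.getD_some]
  have hlen : ((h :: t).length : Int) = (t.length : Int) + 1 := by simp
  have hsplit : PySem.List.pyRange 0 ((h :: t).length : Int) 1 =
      PySem.List.pyRange 0 (t.length : Int) 1 ++ [(t.length : Int)] := by
    rw [hlen, PySem.List.pyRange_one_succ_right (by positivity)]
  rw [hsplit, List.foldl_append]
  simp only [List.foldl_cons, List.foldl_nil, hlen]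
  rw [if_pos trivial]
  have hcongr : (PySem.List.pyRange 0 (t.length : Int) 1).foldl
      (fun big i => if i + 1 = (t.length : Int) + 1 then big
        else let v := PySem.List.pyGetD (h :: t) (i + 1) 0; if big < v then v else big) h
      = (PySem.List.pyRange 0 (t.length : Int) 1).foldl
      (fun big i => max big (PySem.List.pyGetD t i 0)) h := by
    apply PySem.List.foldl_congr_mem
    intro acc x hx
    have hx' := (PySem.List.mem_pyRange_one).mp hx
    have hguard : ¬ (x + 1 = (t.length : Int) + 1) := by omega
    rw [if_neg hguard]
    have hget : PySem.List.pyGetD (h :: t) (x + 1) 0 = PySem.List.pyGetD t x 0 := by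
      unfold PySem.List.pyGetD
      rw [PySem.List.pyGet?_of_nonneg _ (by omega), PySem.List.pyGet?_of_nonneg _ hx'.1]
      have hnat : (x + 1).toNat = x.toNat + 1 := by omega
      rw [hnat]
      simp
    rw [hget]
    by_cases hlt : acc < PySem.List.pyGetD t x 0
    · simp [hlt, max_eq_right hlt.le]
    · simp [hlt, max_eq_left (not_lt.mp hlt)]
  rw [hcongr]
  have := PySem.List.foldl_pyRange_zero_pyGetD' t 0 (fun acc v => max acc v) h
  simpa using this

-- B returns the last element of the sorted list (as an Option, defaulted)
theorem pv_B_eq_getLast? (l : List Int) :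
    catch_big_number_alt l = ((PySem.List.sorted l (fun x => x) false).getLast?).getD 0 := by
  show (PySem.List.pyGet? (PySem.List.sorted l (fun x => x) false) (-1)).getD 0 = _
  rw [PySem.List.pyGet?_neg_one]

-- ===== VERDICT (by name: the statement is the Claim_ definition above) =====
theorem catch_big_number_spec : Claim_equal_catch_big_number := by
  intro num_list _ hpre
  unfold Spec_catch_big_number
  obtain ⟨h, t, rfl⟩ := List.exists_cons_of_ne_nil hpre
  rw [pv_A_eq_foldl_max, pv_B_eq_getLast?]
  set s := PySem.List.sorted (h :: t) (fun x => x) false with hs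
  have hsne : s ≠ [] := by
    intro hnil
    have := PySem.List.length_sorted (h :: t) (fun x => x) false
    rw [← hs, hnil] at this; simp at this
  rw [List.getLast?_eq_getLast_of_ne_nil hsne, Option.getD_some]
  have hperm : s.Perm (h :: t) := PySem.List.sorted_perm _ _ _
  have hpair : s.Pairwise (· ≤ ·) := by
    have := PySem.List.sorted_pairwise (h :: t) (fun x => x)
    simpa [← hs] using this
  have hmax := PySem.List.le_foldl_max t h
  apply le_antisymm
  · -- foldl max ∈ s, so ≤ getLast
    have hmem : t.foldl max h ∈ s := by
      rcases PySem.List.foldl_max_mem t h with heq | hmem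
      · exact hperm.mem_iff.mpr (by rw [heq]; exact List.mem_cons_self)
      · exact hperm.mem_iff.mpr (List.mem_cons_of_mem _ hmem)
    exact pv_mem_le_getLast s hsne hpair _ hmem
  · -- getLast ∈ h :: t, so ≤ foldl max
    have hmem : s.getLast hsne ∈ (h :: t) := hperm.mem_iff.mp (s.getLast_mem hsne)
    rcases List.mem_cons.mp hmem with heq | hmem
    · exact heq ▸ hmax.1
    · exact hmax.2 _ hmem
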